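-- pv_equiv track=rewrite | github.com/ModalityDance/Omni-R1 | src/Inference/inference.py | truncate_by_max_images
-- ===== SOURCE A (Python) =====
-- from typing import Any, Dict, Iterable, List, Optional, Tuple
--
-- def truncate_by_max_images(tokens: List[int], boi_id: int, eos_id: int, max_images: int) -> List[int]:
--     """
--     Keep at most `max_images` images, where an image is identified by <boi>.
--     This counts <boi> occurrences in the full sequence.
--     """
--     if max_images <= 0:
--         return [eos_id]
--
--     count = 0
--     cut_at: Optional[int] = None
--     for i, t in enumerate(tokens):
--         if t == boi_id:
--             count += 1
--             if count > max_images: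
--                 cut_at = i
--                 break
--
--     if cut_at is None:
--         return tokens
--
--     return tokens[:cut_at] + [eos_id]
-- ===== SOURCE B (Python) =====
-- def truncate_by_max_images(tokens, boi_id, eos_id, max_images):
--     if max_images <= 0:
--         return [eos_id]
--     out = []
--     budget = max_images
--     for t in tokens:
--         if t == boi_id:
--             if budget == 0:
--                 out.append(eos_id)
--                 return out
--             budget -= 1
--         out.append(t)
--     return tokens
-- ===== Notes on version B (the rewrite author's own statement) =====
-- stated objective: alternative
-- what changed: Instead of scanning for the cut index and then slicing, B builds the output list directly in one pass while counting an image budget down; when a boi marker arrives with the budget exhausted it appends eos and returns the accumulated prefix, so no indices, enumerate or slicing are used at all.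
import Mathlib
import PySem

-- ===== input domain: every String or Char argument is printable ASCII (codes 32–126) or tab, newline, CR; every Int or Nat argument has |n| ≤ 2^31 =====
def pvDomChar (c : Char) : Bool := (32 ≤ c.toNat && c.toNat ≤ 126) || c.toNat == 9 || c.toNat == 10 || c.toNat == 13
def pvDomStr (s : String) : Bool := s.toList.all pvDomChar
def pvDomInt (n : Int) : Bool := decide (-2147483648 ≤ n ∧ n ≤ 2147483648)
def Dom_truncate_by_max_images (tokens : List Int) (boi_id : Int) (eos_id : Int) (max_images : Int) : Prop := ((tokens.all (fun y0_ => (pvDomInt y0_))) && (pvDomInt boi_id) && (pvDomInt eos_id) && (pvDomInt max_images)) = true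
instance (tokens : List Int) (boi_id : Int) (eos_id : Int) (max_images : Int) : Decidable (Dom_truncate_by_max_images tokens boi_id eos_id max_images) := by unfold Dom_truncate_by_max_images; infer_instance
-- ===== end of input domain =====

-- B builds the output directly in one pass, counting an image budget down (no indices, no slicing);
-- equivalence of the return values is proved on all inputs.

-- ===== PORT A =====
-- A's for-loop over enumerate with a running counter and early break, as structural recursion.
def pvFindCutA (boi_id : Int) (max_images : Int) : List (Int × Int) → Int → Option Int
  | [], _ => none
  | (i, t) :: rest, count =>
    if t = boi_id then
      if count + 1 > max_images then some i
      else pvFindCutA boi_id max_images rest (count + 1)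
    else pvFindCutA boi_id max_images rest count

def truncate_by_max_images (tokens : List Int) (boi_id : Int) (eos_id : Int) (max_images : Int) : List Int :=
  if max_images ≤ 0 then [eos_id]
  else
    match pvFindCutA boi_id max_images (PySem.List.enumerate tokens 0) 0 with
    | none => tokens
    | some cut_at => PySem.List.slice tokens none (some cut_at) ++ [eos_id]

-- ===== PORT B =====
-- B's for-loop with accumulator `out` and decreasing `budget`; `some` models the early return.
def pvBuildB (boi_id : Int) (eos_id : Int) : List Int → Int → List Int → Option (List Int)
  | [], _, _ => none
  | t :: rest, budget, out =>
    if t = boi_id then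
      if budget = 0 then some (out ++ [eos_id])
      else pvBuildB boi_id eos_id rest (budget - 1) (out ++ [t])
    else pvBuildB boi_id eos_id rest budget (out ++ [t])

def truncate_by_max_images_alt (tokens : List Int) (boi_id : Int) (eos_id : Int) (max_images : Int) : List Int :=
  if max_images ≤ 0 then [eos_id]
  else
    match pvBuildB boi_id eos_id tokens max_images [] with
    | some out => out
    | none => tokens

-- ===== PRECONDITION & SPEC =====
def Spec_truncate_by_max_images (tokens : List Int) (boi_id : Int) (eos_id : Int) (max_images : Int) (out : List Int) : Prop := out = truncate_by_max_images_alt tokens boi_id eos_id max_images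
instance (tokens : List Int) (boi_id : Int) (eos_id : Int) (max_images : Int) (out : List Int) : Decidable (Spec_truncate_by_max_images tokens boi_id eos_id max_images out) := by unfold Spec_truncate_by_max_images; infer_instance

-- ===== CLAIM =====
def Claim_equal_truncate_by_max_images : Prop := ∀ (tokens : List Int) (boi_id : Int) (eos_id : Int) (max_images : Int), Dom_truncate_by_max_images tokens boi_id eos_id max_images → Spec_truncate_by_max_images tokens boi_id eos_id max_images (truncate_by_max_images tokens boi_id eos_id max_images)

-- ===== LEMMAS AND PROOFS =====

-- Any index returned by A's scan over `enumerate l n` is ≥ n.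
theorem pvFindCutA_ge (boi m : Int) :
    ∀ (l : List Int) (n : Nat) (count : Int) (i : Int),
      pvFindCutA boi m (PySem.List.enumerate l (n : Int)) count = some i → (n : Int) ≤ i := by
  intro l
  induction l with
  | nil => intro n count i h; simp [PySem.List.enumerate, pvFindCutA] at h
  | cons t rest ih =>
    intro n count i h
    rw [PySem.List.enumerate_cons] at h
    by_cases ht : t = boi
    · rw [pvFindCutA, if_pos ht] at h
      by_cases hc : count + 1 > m
      · rw [if_pos hc] at h
        injection h with h
        omega
      · rw [if_neg hc] at h
        have : ((n : Int) + 1) = ((n + 1 : Nat) : Int) := by push_cast; ring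
        rw [this] at h
        have := ih (n + 1) (count + 1) i h
        omega
    · rw [pvFindCutA, if_neg ht] at h
      have : ((n : Int) + 1) = ((n + 1 : Nat) : Int) := by push_cast; ring
      rw [this] at h
      have := ih (n + 1) count i h
      omega

-- B's accumulator loop agrees with A's cut search: with budget m - count (count ≤ m),
-- B returns the accumulated prefix up to A's cut index, and falls through iff A finds no cut.
theorem pvBuildB_spec (boi eos m : Int) :
    ∀ (suf : List Int) (n : Nat) (count : Int) (acc : List Int), count ≤ m →
      pvBuildB boi eos suf (m - count) acc
        = (pvFindCutA boi m (PySem.List.enumerate suf (n : Int)) count).map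
            (fun i => acc ++ suf.take (i - (n : Int)).toNat ++ [eos]) := by
  intro suf
  induction suf with
  | nil => intro n count acc _; simp [pvBuildB, PySem.List.enumerate, pvFindCutA]
  | cons t rest ih =>
    intro n count acc hc
    rw [PySem.List.enumerate_cons, pvFindCutA, pvBuildB]
    by_cases ht : t = boi
    · rw [if_pos ht, if_pos ht]
      by_cases hcut : count + 1 > m
      · have hb : m - count = 0 := by omega
        rw [if_pos hcut, if_pos hb]
        simp
      · have hb : ¬ (m - count = 0) := by omega
        rw [if_neg hcut, if_neg hb]
        have hmc : m - count - 1 = m - (count + 1) := by ring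
        have hcast : ((n : Int) + 1) = ((n + 1 : Nat) : Int) := by push_cast; ring
        rw [hmc, hcast, ih (n + 1) (count + 1) (acc ++ [t]) (by omega)]
        cases hfind : pvFindCutA boi m (PySem.List.enumerate rest ((n + 1 : Nat) : Int)) (count + 1) with
        | none => simp
        | some i =>
          have hge := pvFindCutA_ge boi m rest (n + 1) (count + 1) i hfind
          simp only [Option.map_some]
          have h1 : (i - (n : Int)).toNat = (i - ((n : Int) + 1)).toNat + 1 := by omega
          have h2 : ((n + 1 : Nat) : Int) = (n : Int) + 1 := by push_cast; ring
          rw [h2] at *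
          simp [h1, List.take_succ_cons]
    · rw [if_neg ht, if_neg ht]
      have hcast : ((n : Int) + 1) = ((n + 1 : Nat) : Int) := by push_cast; ring
      rw [hcast, ih (n + 1) count (acc ++ [t]) hc]
      cases hfind : pvFindCutA boi m (PySem.List.enumerate rest ((n + 1 : Nat) : Int)) count with
      | none => simp
      | some i =>
        have hge := pvFindCutA_ge boi m rest (n + 1) count i hfind
        simp only [Option.map_some]
        have h1 : (i - (n : Int)).toNat = (i - ((n : Int) + 1)).toNat + 1 := by omega
        simp [h1, List.take_succ_cons]

theorem truncate_eq_alt (tokens : List Int) (boi_id : Int) (eos_id : Int) (max_images : Int) :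
    truncate_by_max_images tokens boi_id eos_id max_images
      = truncate_by_max_images_alt tokens boi_id eos_id max_images := by
  unfold truncate_by_max_images truncate_by_max_images_alt
  by_cases hm : max_images ≤ 0
  · simp [hm]
  · rw [if_neg hm, if_neg hm]
    have h0 : (0 : Int) = ((0 : Nat) : Int) := rfl
    have hb : pvBuildB boi_id eos_id tokens (max_images - 0) []
        = (pvFindCutA boi_id max_images (PySem.List.enumerate tokens ((0 : Nat) : Int)) 0).map
            (fun i => [] ++ tokens.take (i - ((0 : Nat) : Int)).toNat ++ [eos_id]) :=
      pvBuildB_spec boi_id eos_id max_images tokens 0 0 [] (by omega)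
    rw [sub_zero] at hb
    rw [show ((0 : Nat) : Int) = (0 : Int) from rfl] at hb
    rw [hb]
    cases hfind : pvFindCutA boi_id max_images (PySem.List.enumerate tokens 0) 0 with
    | none => rfl
    | some i =>
      have hge : (0 : Int) ≤ i := by
        have := pvFindCutA_ge boi_id max_images tokens 0 0 i (by rw [show ((0 : Nat) : Int) = (0 : Int) from rfl]; exact hfind)
        exact this
      simp only [Option.map_some]
      rw [PySem.List.slice_to _ hge]
      simp

-- ===== VERDICT =====
theorem truncate_by_max_images_spec : Claim_equal_truncate_by_max_images := by
  intro tokens boi_id eos_id max_images _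
  exact truncate_eq_alt tokens boi_id eos_id max_images
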